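-- pv_equiv track=rewrite | github.com/dangel34/Compliance-Scanner | ui/experimental_gui.py | get_rule_status
-- ===== SOURCE A (Python) =====
-- from typing import Any, Dict, List, Optional
--
-- RunResult = Dict[str, Any]
--
-- def get_rule_status(result: RunResult) -> str:
--     if result is None:
--         return "NOT_RUN"
--     if "error" in result:
--         return "ERROR"
--     checks = result.get("checks", [])
--     if not checks:
--         return "SKIP"
--     statuses = [c.get("status") for c in checks]
--     if all(s == "PASS" for s in statuses):
--         return "PASS"
--     if all(s == "FAIL" for s in statuses):
--         return "FAIL"
--     return "PARTIAL"
-- ===== SOURCE B (Python) =====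
-- def get_rule_status(result):
--     if result is None:
--         return "NOT_RUN"
--     if "error" in result:
--         return "ERROR"
--     checks = result.get("checks", [])
--     if not checks:
--         return "SKIP"
--     # Pivot on the first check's status: a uniform verdict only exists if every
--     # later status equals the first one and that one is PASS or FAIL.
--     first = checks[0].get("status")
--     if first not in ("PASS", "FAIL"):
--         return "PARTIAL"
--     for c in checks[1:]:
--         if c.get("status") != first:
--             return "PARTIAL"
--     return first
-- ===== Notes on version B (the rewrite author's own statement) =====
-- stated objective: alternative
-- what changed: Replaced the two whole-list all() scans over a materialized statuses list with a first-element pivot: classify by the first check's status and a single early-exit scan that returns PARTIAL at the first deviating status.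
import Mathlib
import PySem

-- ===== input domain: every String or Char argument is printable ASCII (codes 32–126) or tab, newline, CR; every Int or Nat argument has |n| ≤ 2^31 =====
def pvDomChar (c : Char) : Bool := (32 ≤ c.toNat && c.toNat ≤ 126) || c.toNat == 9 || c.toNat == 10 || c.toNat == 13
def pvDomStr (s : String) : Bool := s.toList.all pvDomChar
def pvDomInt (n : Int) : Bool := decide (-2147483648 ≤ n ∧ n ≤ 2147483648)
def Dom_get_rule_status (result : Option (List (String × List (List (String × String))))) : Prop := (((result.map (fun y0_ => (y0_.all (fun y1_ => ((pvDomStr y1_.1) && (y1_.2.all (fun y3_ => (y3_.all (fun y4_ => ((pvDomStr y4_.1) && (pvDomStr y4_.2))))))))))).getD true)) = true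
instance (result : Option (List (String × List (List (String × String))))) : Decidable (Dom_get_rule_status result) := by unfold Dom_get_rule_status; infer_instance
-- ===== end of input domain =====

-- B replaces A's two whole-list all() scans with a first-element pivot and one early-exit scan of the rest (alternative decomposition; same result).

-- ===== PORT A =====
def get_rule_status (result : Option (List (String × List (List (String × String))))) : String :=
  match result with
  | none => "NOT_RUN"
  | some r =>
    if (PySem.Dict.mk r).contains "error" then "ERROR"
    else
      let checks := (PySem.Dict.mk r).getD "checks" []
      if checks.isEmpty then "SKIP"
      else
        let statuses := checks.map (fun c => (PySem.Dict.mk c).get? "status")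
        if statuses.all (fun s => s == some "PASS") then "PASS"
        else if statuses.all (fun s => s == some "FAIL") then "FAIL"
        else "PARTIAL"

-- ===== PORT B =====
-- early-exit scan over the remaining checks: "PARTIAL" at the first status ≠ first, else ret
def pvScanRest (first : Option String) (ret : String) : List (List (String × String)) → String
  | [] => ret
  | c :: cs => if (PySem.Dict.mk c).get? "status" != first then "PARTIAL" else pvScanRest first ret cs

def get_rule_status_alt (result : Option (List (String × List (List (String × String))))) : String :=
  match result with
  | none => "NOT_RUN"
  | some r =>
    if (PySem.Dict.mk r).contains "error" then "ERROR"
    else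
      match (PySem.Dict.mk r).getD "checks" [] with
      | [] => "SKIP"
      | c0 :: rest =>
        match (PySem.Dict.mk c0).get? "status" with
        | some s => if s == "PASS" || s == "FAIL" then pvScanRest (some s) s rest else "PARTIAL"
        | none => "PARTIAL"

-- ===== PRECONDITION & SPEC =====
def Spec_get_rule_status (result : Option (List (String × List (List (String × String))))) (out : String) : Prop := out = get_rule_status_alt result
instance (result : Option (List (String × List (List (String × String))))) (out : String) : Decidable (Spec_get_rule_status result out) := by unfold Spec_get_rule_status; infer_instance

-- ===== CLAIM (what is proved, stated in full; the proofs are below) =====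
def Claim_equal_get_rule_status : Prop := ∀ (result : Option (List (String × List (List (String × String))))), Dom_get_rule_status result → Spec_get_rule_status result (get_rule_status result)

-- ===== LEMMAS AND PROOFS =====

-- ===== VERDICT (by name: the statement is the Claim_ definition above) =====
theorem pvScanRest_eq (s : String) (rest : List (List (String × String))) :
    pvScanRest (some s) s rest
      = (if rest.all (fun c => (PySem.Dict.mk c).get? "status" == some s) then s else "PARTIAL") := by
  induction rest with
  | nil => simp [pvScanRest]
  | cons c cs ih =>
    simp only [pvScanRest, List.all_cons, bne_iff_ne, ne_eq, ite_not, Bool.and_eq_true, beq_iff_eq]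
    by_cases h : (PySem.Dict.mk c).get? "status" = some s <;> simp [h, ih]

-- ===== VERDICT (by name: the statement is the Claim_ definition above) =====
theorem get_rule_status_spec : Claim_equal_get_rule_status := by
  intro result _
  unfold Spec_get_rule_status get_rule_status get_rule_status_alt
  match result with
  | none => rfl
  | some r =>
    simp only
    split
    · rfl
    · rcases h : (PySem.Dict.mk r).getD "checks" [] with _ | ⟨c0, rest⟩
      · simp [h]
      · simp only [h, List.isEmpty_cons, List.map_cons, List.all_cons, if_false,
          Bool.false_eq_true, Bool.and_eq_true]
        rcases h0 : (PySem.Dict.mk c0).get? "status" with _ | s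
        · simp
        · simp only
          by_cases hp : s = "PASS"
          · subst hp
            have hfail : (some ("PASS":String) == some ("FAIL":String)) = false := by decide
            simp [pvScanRest_eq, hfail, List.all_map, Function.comp]
          · by_cases hf : s = "FAIL"
            · subst hf
              have hpf : (some ("FAIL":String) == some ("PASS":String)) = false := by decide
              simp [pvScanRest_eq, hpf, List.all_map, Function.comp]
            · have h1 : (some s == some ("PASS":String)) = false := by simp [hp]
              have h2 : (some s == some ("FAIL":String)) = false := by simp [hf]
              have h3 : (s == "PASS" || s == "FAIL") = false := by simp [hp, hf]
              simp [h1, h2, h3]
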